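-- pv_equiv track=rewrite | github.com/CloneNOX/MSA-BiGCN | dataset/semevalRemake/utils.py | fixText
-- ===== SOURCE A (Python) =====
-- def fixText(raw: str):
--     character = 'abcdefghijklmnopqrstuvwxyz '
--     raw = raw.lower()
--     raw = list(raw)
--     i = 0
--     for i in range(len(raw)):
--         if raw[i] not in character:
--             raw[i] = ' ' + raw[i] + ' '
--     raw = ''.join(raw)
--     return raw
-- ===== SOURCE B (Python) =====
-- def fixText(raw: str):
--     # Run-segmentation scan: copy maximal runs of kept characters as slices,
--     # emitting ' c ' only at each separator character.
--     s = raw.lower()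
--     out = []
--     start = 0
--     for i in range(len(s)):
--         c = s[i]
--         if not ('a' <= c <= 'z' or c == ' '):
--             out.append(s[start:i])
--             out.append(' ' + c + ' ')
--             start = i + 1
--     out.append(s[start:])
--     return ''.join(out)
-- ===== Notes on version B (the rewrite author's own statement) =====
-- stated objective: alternative
-- what changed: Replaced A's in-place per-index list mutation with a run-segmentation scan: B copies maximal runs of kept characters as slices, appends ' c ' only at each separator character, and joins the collected pieces at the end.
import Mathlib
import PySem

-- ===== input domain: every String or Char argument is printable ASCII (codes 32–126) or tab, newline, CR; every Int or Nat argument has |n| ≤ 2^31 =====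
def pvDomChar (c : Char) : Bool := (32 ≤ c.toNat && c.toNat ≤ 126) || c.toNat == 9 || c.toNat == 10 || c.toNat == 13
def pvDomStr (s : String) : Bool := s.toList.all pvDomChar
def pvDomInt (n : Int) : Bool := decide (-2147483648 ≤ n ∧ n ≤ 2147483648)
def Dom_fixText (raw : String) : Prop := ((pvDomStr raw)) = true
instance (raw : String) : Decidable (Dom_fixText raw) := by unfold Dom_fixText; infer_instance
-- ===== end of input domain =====

-- B replaces A's per-index list mutation by a run-segmentation scan that copies maximal
-- runs of kept characters as slices and emits padded separators (objective: alternative).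

-- ===== PORT A =====
def pvCharsA : List Char := "abcdefghijklmnopqrstuvwxyz ".toList

def fixText (raw : String) : String :=
  -- raw = raw.lower(); raw = list(raw)
  let l0 : List (List Char) := (PySem.Chars.lower raw.toList).map (fun c => [c])
  -- for i in range(len(raw)): if raw[i] not in character: raw[i] = ' ' + raw[i] + ' '
  let l1 := (PySem.List.pyRange 0 (l0.length : Int)).foldl
    (fun acc i =>
      let e := PySem.List.pyGetD acc i []
      if PySem.Chars.isIn e pvCharsA then acc
      else PySem.List.pySetD acc i (' ' :: (e ++ [' ']))) l0
  -- return ''.join(raw)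
  String.ofList (PySem.Chars.join [] l1)

-- ===== PORT B =====
-- the body of B's for-loop (helper; used verbatim in the fold below)
def pvStepFunB (s : List Char) (st : List (List Char) × Int) (i : Int) : List (List Char) × Int :=
  -- c = s[i]; if not ('a' <= c <= 'z' or c == ' '): out += [s[start:i], ' '+c+' ']; start = i+1
  let c := PySem.List.pyGetD s i ' '
  if !(('a' ≤ c && c ≤ 'z') || c == ' ') then
    (st.1 ++ [PySem.List.slice s (some st.2) (some i), [' ', c, ' ']], i + 1)
  else st

def fixText_alt (raw : String) : String :=
  -- s = raw.lower()
  let s := PySem.Chars.lower raw.toList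
  -- out = []; start = 0; for i in range(len(s)): <pvStepFunB>
  let res := (PySem.List.pyRange 0 (s.length : Int)).foldl (pvStepFunB s)
    (([] : List (List Char)), (0 : Int))
  -- out.append(s[start:]); return ''.join(out)
  String.ofList (PySem.Chars.join [] (res.1 ++ [PySem.List.slice s (some res.2) none]))

-- ===== PRECONDITION & SPEC =====
def Spec_fixText (raw : String) (out : String) : Prop := out = fixText_alt raw
instance (raw : String) (out : String) : Decidable (Spec_fixText raw out) := by unfold Spec_fixText; infer_instance

-- ===== CLAIM (what is proved, stated in full; the proofs are below) =====
def Claim_equal_fixText : Prop := ∀ (raw : String), Dom_fixText raw → Spec_fixText raw (fixText raw)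

-- ===== LEMMAS AND PROOFS =====

-- the per-element transformation A's loop performs
def pvStepA (e : List Char) : List Char :=
  if PySem.Chars.isIn e pvCharsA then e else ' ' :: (e ++ [' '])

-- the per-character transformation B effectively performs
def pvStepB (c : Char) : List Char :=
  if ('a' ≤ c && c ≤ 'z') || c == ' ' then [c] else [' ', c, ' ']

-- ''.join is flatten (PySem.Chars.join with an empty separator)
lemma pvJoinNil (parts : List (List Char)) :
    PySem.Chars.join [] parts = parts.flatten := by
  induction parts with
  | nil => rfl
  | cons x xs ih =>
    simp only [PySem.Chars.join, List.intercalate] at *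
    cases xs <;> simp_all

-- A's index loop over range(len) is the elementwise map of pvStepA
set_option maxRecDepth 8000 in
lemma pvLoopA (l : List (List Char)) (m : Nat) (hm : m ≤ l.length) :
    (PySem.List.pyRange 0 (m : Int)).foldl
      (fun acc i =>
        let e := PySem.List.pyGetD acc i []
        if PySem.Chars.isIn e pvCharsA then acc
        else PySem.List.pySetD acc i (' ' :: (e ++ [' ']))) l
      = (l.take m).map pvStepA ++ l.drop m := by
  induction m with
  | zero => simp
  | succ m ih =>
    have hm' : m < l.length := hm
    have hcast : ((m + 1 : Nat) : Int) = (m : Int) + 1 := by push_cast; ring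
    rw [hcast, PySem.List.pyRange_one_succ_right (by positivity), List.foldl_append,
      ih (le_of_lt hm')]
    have hlen : ((l.take m).map pvStepA).length = m := by
      simp [Nat.min_eq_left (le_of_lt hm')]
    rw [List.drop_eq_getElem_cons hm']
    have hget : PySem.List.pyGetD ((l.take m).map pvStepA ++ l[m] :: l.drop (m + 1)) (m : Int) []
        = l[m] := by
      rw [PySem.List.pyGetD_eq_getElem _ _ (by positivity) (by simp; omega)]
      simp only [Int.toNat_natCast]
      rw [List.getElem_append_right (by omega)]
      simp [Nat.min_eq_left (le_of_lt hm')]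
    simp only [List.foldl_cons, List.foldl_nil, hget]
    rw [List.take_succ_eq_append_getElem hm', List.map_append]
    by_cases hc : PySem.Chars.isIn l[m] pvCharsA
    · simp only [hc, if_true, List.map_cons, List.map_nil, pvStepA,
        List.append_assoc, List.cons_append, List.nil_append]
    · simp only [hc]
      rw [PySem.List.pySetD_natCast, List.set_append, if_neg (by simp), hlen]
      simp only [Nat.sub_self, List.set_cons_zero, List.map_cons, List.map_nil, pvStepA,
        if_neg hc, List.append_assoc, List.cons_append, List.nil_append]
      rw [if_neg (lt_irrefl m)]

-- B's loop invariant: after m steps the collected runs plus the open run cover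
-- exactly the flattened pvStepB-image of the first m characters
lemma pvLoopB (s : List Char) (m : Nat) (hm : m ≤ s.length) :
    ∃ start : Nat, start ≤ m ∧
      ((PySem.List.pyRange 0 (m : Int)).foldl (pvStepFunB s)
        (([] : List (List Char)), (0 : Int))).2 = (start : Int) ∧
      ((PySem.List.pyRange 0 (m : Int)).foldl (pvStepFunB s)
        (([] : List (List Char)), (0 : Int))).1.flatten ++ (s.drop start).take (m - start)
        = ((s.take m).map pvStepB).flatten := by
  induction m with
  | zero => exact ⟨0, le_refl _, by simp, by simp⟩
  | succ m ih =>
    obtain ⟨start, hsm, h2, h1⟩ := ih (le_of_lt hm)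
    have hm' : m < s.length := hm
    have hcast : ((m + 1 : Nat) : Int) = (m : Int) + 1 := by push_cast; ring
    rw [hcast, PySem.List.pyRange_one_succ_right (by positivity)] at *
    simp only [List.foldl_append, List.foldl_cons, List.foldl_nil] at *
    have hget : PySem.List.pyGetD s (m : Int) ' ' = s[m] := by
      rw [PySem.List.pyGetD_eq_getElem _ _ (by positivity) (by simpa using hm')]
      simp
    by_cases hc : (('a' ≤ s[m] && s[m] ≤ 'z') || s[m] == ' ') = true
    · -- kept character: state unchanged, open run grows by one
      have hneg : ¬((!(('a' ≤ s[m] && s[m] ≤ 'z') || s[m] == ' ')) = true) := by simp [hc]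
      refine ⟨start, by omega, ?_, ?_⟩
      · simp only [pvStepFunB, hget, if_neg hneg]
        exact h2
      · simp only [pvStepFunB, hget, if_neg hneg]
        rw [List.take_succ_eq_append_getElem hm', List.map_append, List.flatten_append, ← h1]
        have hidx : m - start < (s.drop start).length := by
          simp only [List.length_drop]; omega
        have htk : (s.drop start).take (m + 1 - start)
            = (s.drop start).take (m - start) ++ [(s.drop start)[m - start]] := by
          have he : m + 1 - start = (m - start) + 1 := by omega
          rw [he, List.take_succ_eq_append_getElem hidx]
        rw [htk]
        have hel : (s.drop start)[m - start]'hidx = s[m] := by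
          rw [List.getElem_drop]
          congr 1; omega
        simp [hel, pvStepB, hc]
    · -- separator: close the run, emit the padded character, open a new run at m+1
      have hpos : (!(('a' ≤ s[m] && s[m] ≤ 'z') || s[m] == ' ')) = true := by
        rw [Bool.eq_false_iff.mpr hc]; rfl
      refine ⟨m + 1, le_refl _, ?_, ?_⟩
      · simp only [pvStepFunB, hget, if_pos hpos]
        push_cast; ring
      · simp only [pvStepFunB, hget, if_pos hpos]
        simp only [h2, List.flatten_append, List.flatten_cons, List.flatten_nil]
        rw [PySem.List.slice_natCast, List.take_succ_eq_append_getElem hm', List.map_append,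
          List.flatten_append, ← h1]
        simp [pvStepB, hc]

-- the two per-character transformations agree on all codepoints below 128
set_option maxRecDepth 8000 in
lemma pvTableCheck : (List.range 128).all (fun n =>
    pvStepA [Char.ofNat n] == pvStepB (Char.ofNat n)) = true := by
  decide

lemma pvCharStep (n : Nat) (hn : n < 128) :
    pvStepA [Char.ofNat n] = pvStepB (Char.ofNat n) := by
  have := List.all_eq_true.mp pvTableCheck n (List.mem_range.mpr hn)
  exact eq_of_beq this

-- domain chars stay below 128 after lowercasing
set_option maxRecDepth 8000 in
lemma pvLowerLt (c : Char) (h : pvDomChar c = true) :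
    (PySem.Chars.lowerChar c).toNat < 128 := by
  have h1 : c.toNat < 128 := by
    simp only [pvDomChar, Bool.or_eq_true, Bool.and_eq_true, decide_eq_true_eq,
      beq_iff_eq] at h
    omega
  have : c = Char.ofNat c.toNat := (Char.ofNat_toNat c).symm
  rw [this]
  interval_cases h2 : c.toNat <;> decide

-- ===== VERDICT (by name: the statement is the Claim_ definition above) =====
set_option maxRecDepth 8000 in
theorem fixText_spec : Claim_equal_fixText := by
  intro raw hdom
  unfold Spec_fixText fixText fixText_alt
  simp only []
  -- A's side: the index loop is a map
  rw [pvLoopA _ _ (le_refl _), List.take_length, List.drop_length, List.append_nil,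
    List.map_map]
  -- B's side: the run scan flattens to a map
  obtain ⟨start, hsm, h2, h1⟩ :=
    pvLoopB (PySem.Chars.lower raw.toList) (PySem.Chars.lower raw.toList).length (le_refl _)
  rw [h2, pvJoinNil, pvJoinNil, List.flatten_append,
    PySem.List.slice_from_natCast]
  simp only [List.flatten_cons, List.flatten_nil, List.append_nil]
  rw [List.take_length] at h1
  have hdtk : ((PySem.Chars.lower raw.toList).drop start).take
      ((PySem.Chars.lower raw.toList).length - start)
      = (PySem.Chars.lower raw.toList).drop start := by
    apply List.take_of_length_le; simp
  rw [hdtk] at h1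
  rw [h1]
  -- per-character agreement of the two transformations on the lowered domain string
  congr 1
  congr 1
  apply List.map_congr_left
  intro c hc
  simp only [PySem.Chars.lower, List.mem_map] at hc
  obtain ⟨c0, hc0, rfl⟩ := hc
  have hd : pvDomChar c0 = true := by
    unfold Dom_fixText pvDomStr at hdom
    exact List.all_eq_true.mp hdom c0 hc0
  have hlt := pvLowerLt c0 hd
  have heq : PySem.Chars.lowerChar c0 = Char.ofNat (PySem.Chars.lowerChar c0).toNat :=
    (Char.ofNat_toNat _).symm
  have := pvCharStep (PySem.Chars.lowerChar c0).toNat hlt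
  rw [heq]
  simpa using this
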